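-- pv_equiv track=rewrite | github.com/RangelGasharov/Python_Basics | algorithms/edabit_n_differences.py | n_differences
-- ===== SOURCE A (Python) =====
-- def n_differences(number_list):
--     current_list = number_list
--     new_list = []
--     for j in range(len(number_list) - 1):
--         for i in range(len(current_list) - 1):
--             new_list.append(current_list[i + 1] - current_list[i])
--         current_list = new_list
--         new_list = []
--     return current_list[0]
-- ===== SOURCE B (Python) =====
-- def n_differences(number_list):
--     k = len(number_list) - 1
--     total = 0
--     c = 1
--     sign = 1 if k % 2 == 0 else -1
--     for i, a in enumerate(number_list):
--         total += sign * c * a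
--         sign = -sign
--         c = c * (k - i) // (i + 1)
--     return total
-- ===== Notes on version B (the rewrite author's own statement) =====
-- stated objective: faster
-- what changed: Replaces the quadratic table of repeated pairwise differences with a single O(n) pass computing the closed form sum((-1)^(n-1-i)*C(n-1,i)*a_i), maintaining the binomial coefficient multiplicatively.
-- outside the precondition, e.g. on n_differences([]): A raises IndexError, B returns 0
import Mathlib
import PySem

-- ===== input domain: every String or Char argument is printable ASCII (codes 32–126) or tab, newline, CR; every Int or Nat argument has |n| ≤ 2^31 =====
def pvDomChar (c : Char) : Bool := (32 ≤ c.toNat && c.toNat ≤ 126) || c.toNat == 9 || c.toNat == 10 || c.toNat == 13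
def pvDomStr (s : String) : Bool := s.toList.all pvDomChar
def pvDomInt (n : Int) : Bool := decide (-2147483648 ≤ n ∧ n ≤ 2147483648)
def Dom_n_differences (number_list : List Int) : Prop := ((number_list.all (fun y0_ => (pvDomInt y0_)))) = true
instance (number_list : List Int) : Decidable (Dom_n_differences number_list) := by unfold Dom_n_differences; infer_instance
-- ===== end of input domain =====

-- B replaces A's quadratic table of repeated pairwise differences with one linear weighted
-- sum using binomial coefficients maintained multiplicatively (objective: faster).

-- ===== PORT A =====
-- inner loop of A: append current[i+1] - current[i] for i in range(len(current)-1)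
def pyDiffs (cur : List Int) : List Int :=
  (PySem.List.pyRange 0 ((cur.length : Int) - 1) 1).foldl
    (fun acc i => acc ++ [PySem.List.pyGetD cur (i + 1) 0 - PySem.List.pyGetD cur i 0]) []

def n_differences (number_list : List Int) : Int :=
  let final := (PySem.List.pyRange 0 ((number_list.length : Int) - 1) 1).foldl
    (fun cur _ => pyDiffs cur) number_list
  PySem.List.pyGetD final 0 0   -- current_list[0]; the IndexError on [] is excluded by Pre_

-- ===== PORT B =====
-- loop body of B: total += sign*c*a; sign = -sign; c = c*(k-i)//(i+1)
def bStep (k : Int) (s : Int × Int × Int) (p : Int × Int) : Int × Int × Int :=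
  (s.1 + s.2.1 * s.2.2 * p.2, -s.2.1, PySem.Int.floordiv (s.2.2 * (k - p.1)) (p.1 + 1))

def n_differences_alt (number_list : List Int) : Int :=
  let k : Int := (number_list.length : Int) - 1
  ((PySem.List.enumerate number_list 0).foldl (bStep k)
     (0, if PySem.Int.mod k 2 == 0 then (1 : Int) else -1, 1)).1

-- ===== PRECONDITION & SPEC =====
-- A raises IndexError on the empty list (current_list[0]); Pre_ excludes exactly that input.
def Pre_n_differences (number_list : List Int) : Prop := number_list ≠ []
instance (number_list : List Int) : Decidable (Pre_n_differences number_list) := by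
  unfold Pre_n_differences; infer_instance
def pvWitness_n_differences : List Int := [3, 1, 4]

def Spec_n_differences (number_list : List Int) (out : Int) : Prop := out = n_differences_alt number_list
instance (number_list : List Int) (out : Int) : Decidable (Spec_n_differences number_list out) := by unfold Spec_n_differences; infer_instance

-- ===== CLAIM (what is proved, stated in full; the proofs are below) =====
def Claim_equal_n_differences : Prop := ∀ (number_list : List Int), Dom_n_differences number_list → Pre_n_differences number_list → Spec_n_differences number_list (n_differences number_list)

-- ===== LEMMAS AND PROOFS =====

-- the common closed form: the (n-1)-th finite difference of xs as an alternating binomial sum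
def finDiffSum (xs : List Int) : Int :=
  ∑ i ∈ Finset.range xs.length,
    (-1 : Int) ^ (xs.length - 1 - i) * (Nat.choose (xs.length - 1) i : Int) * xs.getD i 0

theorem pyDiffs_eq_map (cur : List Int) :
    pyDiffs cur = (List.range (cur.length - 1)).map
      (fun i => cur.getD (i + 1) 0 - cur.getD i 0) := by
  unfold pyDiffs
  rw [PySem.List.foldl_append_singleton_eq_map]
  rw [PySem.List.pyRange_one]
  rw [List.map_map]
  have : ((cur.length : Int) - 1 - 0).toNat = cur.length - 1 := by omega
  rw [this]
  apply List.map_congr_left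
  intro i hi
  simp only [Function.comp]
  have h1 : ((0 : Int) + i + 1) = ((i + 1 : Nat) : Int) := by push_cast; ring
  have h2 : ((0 : Int) + i) = ((i : Nat) : Int) := by ring
  rw [h1, h2, PySem.List.pyGetD_natCast, PySem.List.pyGetD_natCast]

theorem getD_pyDiffs (cur : List Int) (j : Nat) (h : j < cur.length - 1) :
    (pyDiffs cur).getD j 0 = cur.getD (j + 1) 0 - cur.getD j 0 := by
  rw [pyDiffs_eq_map]
  rw [PySem.List.getD_map_range _ _ _ _ h]

theorem length_pyDiffs (cur : List Int) : (pyDiffs cur).length = cur.length - 1 := by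
  simp [pyDiffs_eq_map]

theorem pascal_sum (k j : Nat) (x : Nat → Int) :
    ∑ i ∈ Finset.range (k + 1),
        (-1 : Int) ^ (k - i) * (Nat.choose k i : Int) * (x (j + i + 1) - x (j + i))
      = ∑ i ∈ Finset.range (k + 2),
        (-1 : Int) ^ (k + 1 - i) * (Nat.choose (k + 1) i : Int) * x (j + i) := by
  have hL : ∑ i ∈ Finset.range (k + 1),
      (-1 : Int) ^ (k - i) * (Nat.choose k i : Int) * (x (j + i + 1) - x (j + i))
    = (∑ i ∈ Finset.range (k + 1), (-1 : Int) ^ (k - i) * (Nat.choose k i : Int) * x (j + i + 1))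
      - ∑ i ∈ Finset.range (k + 1), (-1 : Int) ^ (k - i) * (Nat.choose k i : Int) * x (j + i) := by
    rw [← Finset.sum_sub_distrib]
    exact Finset.sum_congr rfl (fun i _ => by ring)
  have hR : ∑ i ∈ Finset.range (k + 2),
      (-1 : Int) ^ (k + 1 - i) * (Nat.choose (k + 1) i : Int) * x (j + i)
    = ((∑ i ∈ Finset.range (k + 1), (-1 : Int) ^ (k - i) * (Nat.choose k i : Int) * x (j + i + 1))
       + ∑ i ∈ Finset.range (k + 1), (-1 : Int) ^ (k - i) * (Nat.choose k (i + 1) : Int) * x (j + i + 1))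
      + (-1 : Int) ^ (k + 1) * x j := by
    rw [Finset.sum_range_succ']
    rw [← Finset.sum_add_distrib]
    congr 1
    · apply Finset.sum_congr rfl
      intro i hi
      simp only [Finset.mem_range] at hi
      have h1 : k + 1 - (i + 1) = k - i := by omega
      rw [h1, Nat.choose_succ_succ, show j + (i + 1) = j + i + 1 from rfl]
      push_cast
      ring
    · simp
  have hS2 : ∑ i ∈ Finset.range (k + 1), (-1 : Int) ^ (k - i) * (Nat.choose k i : Int) * x (j + i)
    = (∑ i ∈ Finset.range k, (-1 : Int) ^ (k - (i + 1)) * (Nat.choose k (i + 1) : Int) * x (j + i + 1))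
      + (-1 : Int) ^ k * x j := by
    rw [Finset.sum_range_succ']
    simp [Nat.add_assoc]
  have hS3 : ∑ i ∈ Finset.range (k + 1), (-1 : Int) ^ (k - i) * (Nat.choose k (i + 1) : Int) * x (j + i + 1)
    = ∑ i ∈ Finset.range k, (-1 : Int) ^ (k - i) * (Nat.choose k (i + 1) : Int) * x (j + i + 1) := by
    rw [Finset.sum_range_succ]
    simp
  have hneg : ∑ i ∈ Finset.range k, (-1 : Int) ^ (k - i) * (Nat.choose k (i + 1) : Int) * x (j + i + 1)
    = - ∑ i ∈ Finset.range k, (-1 : Int) ^ (k - (i + 1)) * (Nat.choose k (i + 1) : Int) * x (j + i + 1) := by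
    rw [← Finset.sum_neg_distrib]
    apply Finset.sum_congr rfl
    intro i hi
    simp only [Finset.mem_range] at hi
    have h1 : k - i = (k - (i + 1)) + 1 := by omega
    rw [h1, pow_succ]
    ring
  rw [hL, hR, hS2, hS3, hneg, pow_succ]
  ring

theorem iter_pyDiffs_getD (k : Nat) : ∀ (xs : List Int) (j : Nat), k + j < xs.length →
    (pyDiffs^[k] xs).getD j 0
      = ∑ i ∈ Finset.range (k + 1),
          (-1 : Int) ^ (k - i) * (Nat.choose k i : Int) * xs.getD (j + i) 0 := by
  induction k with
  | zero => intro xs j h; simp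
  | succ n ih =>
    intro xs j h
    rw [Function.iterate_succ_apply]
    have hlen : n + j < (pyDiffs xs).length := by rw [length_pyDiffs]; omega
    rw [ih (pyDiffs xs) j hlen]
    have hstep : ∀ i ∈ Finset.range (n + 1),
        (-1 : Int) ^ (n - i) * (Nat.choose n i : Int) * (pyDiffs xs).getD (j + i) 0
        = (-1 : Int) ^ (n - i) * (Nat.choose n i : Int) * (xs.getD (j + i + 1) 0 - xs.getD (j + i) 0) := by
      intro i hi
      simp only [Finset.mem_range] at hi
      rw [getD_pyDiffs xs (j + i) (by omega)]
    rw [Finset.sum_congr rfl hstep]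
    exact pascal_sum n j (fun t => xs.getD t 0)

-- A's outer loop ignores its counter, so the fold is function iteration
theorem foldl_const_iterate {α β : Type} (f : α → α) (l : List β) :
    ∀ (x : α), l.foldl (fun c _ => f c) x = f^[l.length] x := by
  induction l with
  | nil => intro x; simp
  | cons a t ih => intro x; simp [ih, Function.iterate_succ_apply]

theorem a_eq_sum (xs : List Int) (h : xs ≠ []) : n_differences xs = finDiffSum xs := by
  unfold n_differences finDiffSum
  have hlen : 1 ≤ xs.length := List.length_pos_of_ne_nil h
  rw [foldl_const_iterate]
  rw [PySem.List.length_pyRange_one]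
  have hk : ((xs.length : Int) - 1 - 0).toNat = xs.length - 1 := by omega
  rw [hk]
  rw [PySem.List.pyGetD_ofNat']
  rw [iter_pyDiffs_getD (xs.length - 1) xs 0 (by omega)]
  have h2 : xs.length - 1 + 1 = xs.length := by omega
  rw [h2]
  exact Finset.sum_congr rfl (fun i _ => by norm_num)

-- the multiplicative Pascal step: C(k,t)*(k-t) // (t+1) = C(k,t+1), exact division
theorem choose_step (k t : Nat) (ht : t ≤ k) :
    PySem.Int.floordiv ((Nat.choose k t : Int) * ((k : Int) - (t : Int))) ((t : Int) + 1)
      = (Nat.choose k (t + 1) : Int) := by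
  have hsub : ((k : Int) - (t : Int)) = ((k - t : Nat) : Int) := by omega
  have hnum : (Nat.choose k t) * (k - t) = Nat.choose k (t + 1) * (t + 1) :=
    (Nat.choose_succ_right_eq k t).symm
  rw [hsub]
  rw [show ((Nat.choose k t : Int) * ((k - t : Nat) : Int)) = ((Nat.choose k (t + 1) * (t + 1) : Nat) : Int) by push_cast [← hnum]; ring]
  rw [show ((t : Int) + 1) = ((t + 1 : Nat) : Int) by push_cast; ring]
  rw [PySem.Int.floordiv_natCast]
  rw [Nat.mul_div_cancel _ (by omega)]

theorem foldB_inv (k : Nat) : ∀ (l : List Int) (t : Nat) (total : Int), t + l.length = k + 1 →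
    ((PySem.List.enumerate l (t : Int)).foldl (bStep ((k : Nat) : Int))
        (total, (-1 : Int) ^ k * (-1) ^ t, (Nat.choose k t : Int))).1
      = total + ∑ i ∈ Finset.range l.length,
          (-1 : Int) ^ (k - (t + i)) * (Nat.choose k (t + i) : Int) * l.getD i 0 := by
  intro l
  induction l with
  | nil => intro t total h; simp [PySem.List.enumerate]
  | cons a rest ih =>
    intro t total h
    rw [PySem.List.enumerate_cons, List.foldl_cons]
    have ht : t ≤ k := by simp at h; omega
    have hstep : bStep ((k : Nat) : Int) (total, (-1 : Int) ^ k * (-1) ^ t, (Nat.choose k t : Int)) ((t : Int), a)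
        = (total + ((-1 : Int) ^ k * (-1) ^ t) * (Nat.choose k t : Int) * a,
           (-1 : Int) ^ k * (-1) ^ (t + 1), (Nat.choose k (t + 1) : Int)) := by
      simp only [bStep, Prod.mk.injEq]
      refine ⟨trivial, ?_, ?_⟩
      · rw [pow_succ]; ring
      · exact choose_step k t ht
    rw [hstep]
    rw [show ((t : Int) + 1) = (((t + 1 : Nat)) : Int) by push_cast; ring]
    rw [ih (t + 1) _ (by simp at h; omega)]
    rw [List.length_cons, Finset.sum_range_succ']
    have hterm : (-1 : Int) ^ (k - (t + 0)) * (Nat.choose k (t + 0) : Int) * (a :: rest).getD 0 0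
        = (-1 : Int) ^ k * (-1 : Int) ^ t * (Nat.choose k t : Int) * a := by
      simp only [Nat.add_zero, List.getD_cons_zero]
      have : (-1 : Int) ^ (k - t) = (-1 : Int) ^ k * (-1 : Int) ^ t := by
        have hkt : k = (k - t) + t := by omega
        calc (-1 : Int) ^ (k - t) = (-1) ^ (k - t) * ((-1) ^ t * (-1) ^ t) := by
              rw [← pow_add]; simp [← two_mul]
          _ = (-1) ^ ((k - t) + t) * (-1) ^ t := by rw [pow_add]; ring
          _ = (-1) ^ k * (-1) ^ t := by rw [← hkt]
      rw [this]
    have hshift : ∀ i ∈ Finset.range rest.length,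
        (-1 : Int) ^ (k - (t + (i + 1))) * (Nat.choose k (t + (i + 1)) : Int) * (a :: rest).getD (i + 1) 0
        = (-1 : Int) ^ (k - ((t + 1) + i)) * (Nat.choose k ((t + 1) + i) : Int) * rest.getD i 0 := by
      intro i _
      have h1 : t + (i + 1) = (t + 1) + i := by omega
      rw [h1, List.getD_cons_succ]
    rw [Finset.sum_congr rfl hshift, hterm]
    ring

theorem b_eq_sum (xs : List Int) (h : xs ≠ []) : n_differences_alt xs = finDiffSum xs := by
  unfold n_differences_alt finDiffSum
  obtain ⟨k, hk⟩ : ∃ k, xs.length = k + 1 := ⟨xs.length - 1, by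
    have := List.length_pos_of_ne_nil h; omega⟩
  have hki : ((xs.length : Int) - 1) = ((k : Nat) : Int) := by rw [hk]; push_cast; ring
  simp only [hki]
  have hinv := foldB_inv k xs 0 0 (by omega)
  simp only [Nat.cast_zero, pow_zero, mul_one, Nat.choose_zero_right, Nat.cast_one, zero_add] at hinv
  have hsign : (if PySem.Int.mod ((k : Nat) : Int) 2 == 0 then (1 : Int) else -1)
      = (-1 : Int) ^ k := by
    rw [show ((2 : Int)) = ((2 : Nat) : Int) from rfl, PySem.Int.mod_natCast]
    rcases Nat.even_or_odd k with he | ho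
    · simp [Nat.even_iff.mp he, he.neg_one_pow]
    · simp [Nat.odd_iff.mp ho, ho.neg_one_pow]
  rw [hsign, hinv, hk]
  simp

-- ===== VERDICT (by name: the statement is the Claim_ definition above) =====
theorem n_differences_spec : Claim_equal_n_differences := by
  intro xs _ hpre
  unfold Spec_n_differences
  rw [a_eq_sum xs hpre, b_eq_sum xs hpre]
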